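-- pv_equiv track=rewrite | github.com/greivinlopez/coding-solutions | python/leetcode/problems_1400_1499/1487_making_file_names_unique.py | get_folder_names
-- ===== SOURCE A (Python) =====
-- from collections import defaultdict
--
-- def get_folder_names(names):
--     # Dictionary to track the next available suffix number for each base name
--     name_counter = defaultdict(int)
--
--     for i, name in enumerate(names):
--         # Check if the current name already exists
--         if name in name_counter:
--             # Get the next suffix number to try
--             suffix_num = name_counter[name]
--
--             # Find the smallest available suffix by incrementing
--             while f'{name}({suffix_num})' in name_counter:
--                 suffix_num += 1
--
--             # Update the next available suffix for this base name
--             name_counter[name] = suffix_num + 1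
--
--             # Modify the current name with the suffix
--             names[i] = f'{name}({suffix_num})'
--
--         # Mark the final name (original or modified) as used
--         name_counter[names[i]] = 1
--
--     return names
-- ===== SOURCE B (Python) =====
-- def get_folder_names(names):
--     # Single membership set; rescan suffixes from 1 on each collision.
--     # (Mutates `names` in place and returns it, like the original.)
--     used = set()
--     for i, name in enumerate(names):
--         if name in used:
--             k = 1
--             while f'{name}({k})' in used:
--                 k += 1
--             names[i] = f'{name}({k})'
--         used.add(names[i])
--     return names
-- ===== Notes on version B (the rewrite author's own statement) =====
-- stated objective: simpler
-- what changed: Replaces the dual-purpose defaultdict (membership marker plus persisted next-suffix pointer per base name) by a single set of used names, rescanning candidate suffixes from 1 at every collision instead of resuming from a stored counter.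
import Mathlib
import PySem

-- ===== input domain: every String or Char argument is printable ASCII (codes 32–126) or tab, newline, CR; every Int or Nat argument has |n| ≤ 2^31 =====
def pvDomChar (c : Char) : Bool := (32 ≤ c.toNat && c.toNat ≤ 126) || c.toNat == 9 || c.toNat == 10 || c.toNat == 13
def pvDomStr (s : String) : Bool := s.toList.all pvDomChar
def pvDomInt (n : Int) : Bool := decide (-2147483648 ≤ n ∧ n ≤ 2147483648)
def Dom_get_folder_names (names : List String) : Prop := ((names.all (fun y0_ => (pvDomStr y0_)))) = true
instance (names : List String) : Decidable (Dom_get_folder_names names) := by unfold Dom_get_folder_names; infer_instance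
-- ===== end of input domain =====

-- B replaces A's defaultdict (membership + stored next-suffix pointer) by a single used-set,
-- rescanning suffixes from 1 on each collision; same return value (both Pythons mutate the
-- input list in place and return it — the equivalence proved here is about the return value).

-- f'{name}({k})' (shared one-line formatting helper)
def pvFmt (name : String) (k : Int) : String := name ++ "(" ++ PySem.Int.toStr k ++ ")"

-- ===== PORT A =====
-- the 'while f'{name}(suffix_num)' in name_counter: suffix_num += 1' loop; the fuel
-- (d.size + 1) only totalizes it and is proved sufficient below
def pvLoopA (d : PySem.Dict String Int) (name : String) : Nat → Int → Int
  | 0, s => s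
  | fuel + 1, s => if d.contains (pvFmt name s) then pvLoopA d name fuel (s + 1) else s

def pvGoA (d : PySem.Dict String Int) : List String → List String
  | [] => []
  | name :: rest =>
    if d.contains name then
      let suffix := pvLoopA d name (d.size + 1) (d.getD name 0)
      let newname := pvFmt name suffix
      newname :: pvGoA ((d.insert name (suffix + 1)).insert newname 1) rest
    else
      name :: pvGoA (d.insert name 1) rest

def get_folder_names (names : List String) : List String :=
  pvGoA PySem.Dict.empty names

-- ===== PORT B =====
-- the 'while f'{name}({k})' in used: k += 1' loop; fuel (u.length + 1) only totalizes it
def pvLoopB (u : PySem.Set String) (name : String) : Nat → Int → Int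
  | 0, k => k
  | fuel + 1, k => if PySem.Set.contains u (pvFmt name k) then pvLoopB u name fuel (k + 1) else k

def get_folder_names_alt (names : List String) : List String :=
  (names.foldl
    (fun (st : PySem.Set String × List String) name =>
      if PySem.Set.contains st.1 name then
        let newname := pvFmt name (pvLoopB st.1 name (st.1.length + 1) 1)
        (PySem.Set.add st.1 newname, st.2 ++ [newname])
      else
        (PySem.Set.add st.1 name, st.2 ++ [name]))
    (PySem.Set.empty, [])).2

-- ===== PRECONDITION & SPEC =====
def Spec_get_folder_names (names : List String) (out : List String) : Prop := out = get_folder_names_alt names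
instance (names : List String) (out : List String) : Decidable (Spec_get_folder_names names out) := by unfold Spec_get_folder_names; infer_instance

-- ===== CLAIM (what is proved, stated in full; the proofs are below) =====
def Claim_equal_get_folder_names : Prop := ∀ (names : List String), Dom_get_folder_names names → Spec_get_folder_names names (get_folder_names names)

-- ===== LEMMAS AND PROOFS =====

-- decode of a decimal-digit string; used only to prove Nat.toDigits 10 injective
def pvDec (l : List Char) : Nat := l.foldl (fun a c => a * 10 + (c.toNat - 48)) 0

theorem pvDigitChar_val (k : Nat) (h : k < 10) : (Nat.digitChar k).toNat - 48 = k := by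
  interval_cases k <;> decide

theorem pvToDigitsCore_append (f : Nat) : ∀ (n : Nat) (l : List Char),
    Nat.toDigitsCore 10 f n l = Nat.toDigitsCore 10 f n [] ++ l := by
  induction f with
  | zero => intro n l; simp [Nat.toDigitsCore]
  | succ f ih =>
    intro n l
    simp only [Nat.toDigitsCore]
    by_cases h : n / 10 = 0
    · simp [h]
    · simp only [h, if_false]
      rw [ih (n / 10) (Nat.digitChar (n % 10) :: l), ih (n / 10) [Nat.digitChar (n % 10)]]
      simp

theorem pvToDigitsCore_fuel (n : Nat) : ∀ (f g : Nat) (l : List Char), n < f → n < g →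
    Nat.toDigitsCore 10 f n l = Nat.toDigitsCore 10 g n l := by
  induction n using Nat.strong_induction_on with
  | _ n ih =>
    intro f g l hf hg
    match f, g with
    | f + 1, g + 1 =>
      simp only [Nat.toDigitsCore]
      by_cases h : n / 10 = 0
      · simp [h]
      · simp only [h, if_false]
        have hn : 0 < n := by
          rcases Nat.eq_zero_or_pos n with h0 | h0
          · simp [h0] at h
          · exact h0
        have hlt : n / 10 < n := Nat.div_lt_self hn (by norm_num)
        exact ih (n / 10) hlt f g _ (by omega) (by omega)

theorem pvDec_toDigits (n : Nat) : pvDec (Nat.toDigits 10 n) = n := by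
  induction n using Nat.strong_induction_on with
  | _ n ih =>
    unfold Nat.toDigits
    simp only [Nat.toDigitsCore]
    by_cases h : n / 10 = 0
    · have hn : n < 10 := by omega
      have : n % 10 = n := Nat.mod_eq_of_lt hn
      simp [h, this, pvDec, pvDigitChar_val n hn]
    · simp only [h, if_false]
      have hn : 0 < n := by
        rcases Nat.eq_zero_or_pos n with h0 | h0
        · simp [h0] at h
        · exact h0
      have hlt : n / 10 < n := Nat.div_lt_self hn (by norm_num)
      rw [pvToDigitsCore_append, pvToDigitsCore_fuel (n / 10) n (n / 10 + 1) [] (by omega) (by omega)]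
      have : Nat.toDigitsCore 10 (n / 10 + 1) (n / 10) [] = Nat.toDigits 10 (n / 10) := rfl
      rw [this]
      have hd : pvDec (Nat.toDigits 10 (n / 10) ++ [Nat.digitChar (n % 10)])
          = pvDec (Nat.toDigits 10 (n / 10)) * 10 + ((Nat.digitChar (n % 10)).toNat - 48) := by
        simp [pvDec, List.foldl_append]
      rw [hd, ih (n / 10) hlt, pvDigitChar_val (n % 10) (Nat.mod_lt n (by norm_num))]
      omega

theorem pvToChars_inj {a b : Int} (ha : 0 ≤ a) (hb : 0 ≤ b)
    (h : PySem.Int.toChars a = PySem.Int.toChars b) : a = b := by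
  unfold PySem.Int.toChars at h
  rw [if_neg (by omega), if_neg (by omega)] at h
  have := congrArg pvDec h
  rw [pvDec_toDigits, pvDec_toDigits] at this
  omega

theorem pvFmt_inj {name : String} {t t' : Int} (ht : 0 ≤ t) (ht' : 0 ≤ t')
    (h : pvFmt name t = pvFmt name t') : t = t' := by
  unfold pvFmt at h
  have h2 := congrArg String.toList h
  simp only [String.toList_append, PySem.Int.toList_toStr] at h2
  have h3 := List.append_cancel_right h2
  have h4 := List.append_cancel_left h3
  exact pvToChars_inj ht ht' h4

-- B's loop as the proofs see it: recursion over the remaining names (the foldl of the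
-- port is bridged to this by pvFoldB_eq)
def pvGoB (u : PySem.Set String) : List String → List String
  | [] => []
  | name :: rest =>
    if PySem.Set.contains u name then
      let newname := pvFmt name (pvLoopB u name (u.length + 1) 1)
      newname :: pvGoB (PySem.Set.add u newname) rest
    else
      name :: pvGoB (PySem.Set.add u name) rest

theorem pvFoldB_eq : ∀ (names : List String) (u : PySem.Set String) (acc : List String),
    (names.foldl
      (fun (st : PySem.Set String × List String) name =>
        if PySem.Set.contains st.1 name then
          let newname := pvFmt name (pvLoopB st.1 name (st.1.length + 1) 1)
          (PySem.Set.add st.1 newname, st.2 ++ [newname])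
        else
          (PySem.Set.add st.1 name, st.2 ++ [name]))
      (u, acc)).2 = acc ++ pvGoB u names := by
  intro names
  induction names with
  | nil => intro u acc; simp [pvGoB]
  | cons name rest ih =>
    intro u acc
    simp only [List.foldl_cons, pvGoB]
    by_cases h : PySem.Set.contains u name
    · simp only [h, if_true]
      rw [ih]
      simp
    · simp only [h]
      rw [ih]
      simp

-- the relational invariant between A's dict and B's set
def pvInv (d : PySem.Dict String Int) (u : PySem.Set String) : Prop :=
  d.keys = u ∧ u.Nodup ∧
  ∀ (name : String) (v : Int), d.get? name = some v →
    1 ≤ v ∧ ∀ t : Int, 1 ≤ t → t < v → pvFmt name t ∈ u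

theorem pvLoopA_eq_loopB (d : PySem.Dict String Int) (u : PySem.Set String)
    (hk : d.keys = u) (name : String) : ∀ (fuel : Nat) (s : Int),
    pvLoopA d name fuel s = pvLoopB u name fuel s := by
  intro fuel
  induction fuel with
  | zero => intro s; rfl
  | succ f ih =>
    intro s
    simp only [pvLoopA, pvLoopB]
    have hc : d.contains (pvFmt name s) = PySem.Set.contains u (pvFmt name s) := by
      rw [PySem.Dict.contains_eq_decide_mem_keys, hk]
      simp [PySem.Set.contains_eq_listContains]
    rw [hc]
    by_cases h : pvFmt name s ∈ u
    · simp [h, ih]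
    · simp [h]

-- spec of the scan loop: with enough fuel it returns the first free suffix ≥ s
theorem pvLoopB_spec (u : PySem.Set String) (name : String) : ∀ (fuel : Nat) (s : Int),
    (∃ j : Nat, j < fuel ∧ pvFmt name (s + j) ∉ u) →
    s ≤ pvLoopB u name fuel s ∧ pvFmt name (pvLoopB u name fuel s) ∉ u ∧
      ∀ t : Int, s ≤ t → t < pvLoopB u name fuel s → pvFmt name t ∈ u := by
  intro fuel
  induction fuel with
  | zero => rintro s ⟨j, hj, _⟩; omega
  | succ f ih =>
    rintro s ⟨j, hj, hfree⟩
    simp only [pvLoopB]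
    by_cases h : PySem.Set.contains u (pvFmt name s)
    · have hmem : pvFmt name s ∈ u := (PySem.Set.contains_iff u (pvFmt name s)).mp h
      have hj0 : j ≠ 0 := by rintro rfl; simp at hfree; exact hfree hmem
      have hstep : ∃ j' : Nat, j' < f ∧ pvFmt name (s + 1 + j') ∉ u := by
        refine ⟨j - 1, by omega, ?_⟩
        have : s + 1 + (↑(j - 1) : Int) = s + j := by
          push_cast [Nat.cast_sub (by omega : 1 ≤ j)]; ring
        rw [this]; exact hfree
      obtain ⟨h1, h2, h3⟩ := ih (s + 1) hstep
      rw [if_pos h]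
      refine ⟨by omega, h2, ?_⟩
      intro t hts htlt
      by_cases hts1 : s + 1 ≤ t
      · exact h3 t hts1 htlt
      · have : t = s := by omega
        rw [this]; exact hmem
    · rw [if_neg h]
      exact ⟨le_refl s, fun hmem => h ((PySem.Set.contains_iff u (pvFmt name s)).mpr hmem),
        fun t hts htlt => absurd (hts.trans_lt htlt) (lt_irrefl s)⟩

-- fuel u.length + 1 is always sufficient (pigeonhole on the distinct formatted names)
theorem pvFuel_suff (u : PySem.Set String) (name : String) (s : Int) (hs : 1 ≤ s) :
    ∃ j : Nat, j < u.length + 1 ∧ pvFmt name (s + j) ∉ u := by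
  by_contra hall
  have hsub : ∀ j ∈ List.range (u.length + 1), pvFmt name (s + j) ∈ u := by
    intro j hj
    by_contra hfree
    exact hall ⟨j, List.mem_range.mp hj, hfree⟩
  have hnodup : ((List.range (u.length + 1)).map (fun j : Nat => pvFmt name (s + j))).Nodup := by
    refine List.Nodup.map_on ?_ (List.nodup_range)
    intro x _ y _ hxy
    have := pvFmt_inj (by omega : (0:Int) ≤ s + x) (by omega : (0:Int) ≤ s + y) hxy
    omega
  have hsub' : ((List.range (u.length + 1)).map (fun j : Nat => pvFmt name (s + j))) ⊆ u := by
    intro x hx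
    obtain ⟨j, hj, rfl⟩ := List.mem_map.mp hx
    exact hsub j hj
  have := (hnodup.subperm hsub').length_le
  simp at this

-- both scans stop at the same suffix: below v everything is used, so the first free
-- suffix ≥ v equals the first free suffix ≥ 1
theorem pvFirstFree_unique (u : PySem.Set String) (name : String) (v r1 r2 : Int)
    (hv : 1 ≤ v) (hbelow : ∀ t : Int, 1 ≤ t → t < v → pvFmt name t ∈ u)
    (h1a : v ≤ r1) (h1b : pvFmt name r1 ∉ u) (h1c : ∀ t : Int, v ≤ t → t < r1 → pvFmt name t ∈ u)
    (h2a : (1:Int) ≤ r2) (h2b : pvFmt name r2 ∉ u) (h2c : ∀ t : Int, (1:Int) ≤ t → t < r2 → pvFmt name t ∈ u) :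
    r1 = r2 := by
  have hr2v : v ≤ r2 := by
    by_contra hlt
    exact h2b (hbelow r2 h2a (by omega))
  have hle : r1 ≤ r2 := by
    by_contra hlt
    exact h2b (h1c r2 hr2v (by omega))
  have hge : r2 ≤ r1 := by
    by_contra hlt
    exact h1b (h2c r1 (by omega) (by omega))
  omega

theorem pvMain : ∀ (names : List String) (d : PySem.Dict String Int) (u : PySem.Set String),
    pvInv d u → pvGoA d names = pvGoB u names := by
  intro names
  induction names with
  | nil => intro d u _; rfl
  | cons name rest ih =>
    intro d u hinv
    obtain ⟨hkeys, hnd, hval⟩ := hinv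
    simp only [pvGoA, pvGoB]
    have hcon : d.contains name = PySem.Set.contains u name := by
      rw [PySem.Dict.contains_eq_decide_mem_keys, hkeys]
      simp [PySem.Set.contains_eq_listContains]
    by_cases hc : PySem.Set.contains u name
    · -- collision case
      have hdc : d.contains name = true := by rw [hcon]; exact hc
      simp only [hdc, hc, if_true]
      -- the stored pointer v
      have hsome : (d.get? name).isSome := by
        rw [← PySem.Dict.contains_eq_isSome_get?]; exact hdc
      obtain ⟨v, hv⟩ := Option.isSome_iff_exists.mp hsome
      have hgetD : d.getD name 0 = v := PySem.Dict.getD_of_get?_eq_some d 0 hv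
      obtain ⟨hv1, hbelow⟩ := hval name v hv
      -- sizes agree
      have hsize : d.size = u.length := by
        have : d.keys.length = u.length := by rw [hkeys]
        simpa [PySem.Dict.keys] using this
      -- the two loop results
      rw [pvLoopA_eq_loopB d u hkeys, hgetD, hsize]
      obtain ⟨h1a, h1b, h1c⟩ := pvLoopB_spec u name (u.length + 1) v (pvFuel_suff u name v hv1)
      obtain ⟨h2a, h2b, h2c⟩ := pvLoopB_spec u name (u.length + 1) 1 (pvFuel_suff u name 1 le_rfl)
      set r1 := pvLoopB u name (u.length + 1) v with hr1
      set r2 := pvLoopB u name (u.length + 1) 1 with hr2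
      have hreq : r1 = r2 := pvFirstFree_unique u name v r1 r2 hv1 hbelow h1a h1b h1c h2a h2b h2c
      rw [← hreq]
      -- the new states satisfy the invariant
      have hfresh : pvFmt name r1 ∉ u := h1b
      have hr1pos : 1 ≤ r1 := by omega
      refine congrArg _ (ih _ _ ⟨?_, ?_, ?_⟩)
      · -- keys
        have hnc : (d.insert name (r1 + 1)).contains (pvFmt name r1) = false := by
          rw [PySem.Dict.contains_eq_decide_mem_keys, PySem.Dict.keys_insert_of_contains _ _ hdc, hkeys]
          simp [hfresh]
        rw [PySem.Dict.keys_insert_of_not_contains _ _ hnc, PySem.Dict.keys_insert_of_contains _ _ hdc,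
            hkeys, PySem.Set.add_of_not_mem hfresh]
      · exact PySem.Set.nodup_add _ _ hnd
      · intro name' v' hget
        by_cases he1 : name' = pvFmt name r1
        · rw [he1, PySem.Dict.get?_insert_self] at hget
          have : v' = 1 := by injection hget with h; omega
          refine ⟨by omega, fun t ht1 ht2 => absurd ht2 (by omega)⟩
        · rw [PySem.Dict.get?_insert_of_ne _ _ he1] at hget
          by_cases he2 : name' = name
          · subst he2
            rw [PySem.Dict.get?_insert_self] at hget
            have hv' : v' = r1 + 1 := by injection hget with h; omega
            refine ⟨by omega, ?_⟩
            intro t ht1 ht2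
            rw [PySem.Set.mem_add _ _ _]
            by_cases htv : t < v
            · exact Or.inl (hbelow t ht1 htv)
            · by_cases htr : t < r1
              · exact Or.inl (h1c t (by omega) htr)
              · have : t = r1 := by omega
                exact Or.inr (by rw [this])
          · rw [PySem.Dict.get?_insert_of_ne _ _ he2] at hget
            obtain ⟨hv'1, hv'2⟩ := hval name' v' hget
            refine ⟨hv'1, fun t ht1 ht2 => ?_⟩
            rw [PySem.Set.mem_add _ _ _]
            exact Or.inl (hv'2 t ht1 ht2)
    · -- fresh-name case
      have hdc : d.contains name = false := by
        rw [hcon]; exact Bool.eq_false_iff.mpr hc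
      simp only [hdc, hc, if_false, Bool.false_eq_true]
      have hnmem : name ∉ u := fun hmem => hc ((PySem.Set.contains_iff u name).mpr hmem)
      refine congrArg _ (ih _ _ ⟨?_, ?_, ?_⟩)
      · rw [PySem.Dict.keys_insert_of_not_contains _ _ hdc, hkeys, PySem.Set.add_of_not_mem hnmem]
      · exact PySem.Set.nodup_add _ _ hnd
      · intro name' v' hget
        by_cases he : name' = name
        · rw [he, PySem.Dict.get?_insert_self] at hget
          have : v' = 1 := by injection hget with h; omega
          exact ⟨by omega, fun t ht1 ht2 => absurd ht2 (by omega)⟩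
        · rw [PySem.Dict.get?_insert_of_ne _ _ he] at hget
          obtain ⟨hv'1, hv'2⟩ := hval name' v' hget
          exact ⟨hv'1, fun t ht1 ht2 => (PySem.Set.mem_add _ _ _).mpr (Or.inl (hv'2 t ht1 ht2))⟩

-- ===== VERDICT (by name: the statement is the Claim_ definition above) =====
theorem get_folder_names_spec : Claim_equal_get_folder_names := by
  intro names _
  unfold Spec_get_folder_names get_folder_names get_folder_names_alt
  rw [pvFoldB_eq names PySem.Set.empty []]
  rw [pvMain names PySem.Dict.empty PySem.Set.empty ⟨by simp [PySem.Dict.keys_empty], List.nodup_nil, by simp [PySem.Dict.get?_empty]⟩]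
  rfl
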